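-- pv_equiv track=rewrite | github.com/netor27/codefights-arcade-solutions | arcade/python/arcade-theCore/12_ListBackwoods/105_StarRotation.py | starRotation
-- ===== SOURCE A (Python) =====
-- def starRotation(matrix, width, center, t):
--     y = center[0]
--     x = center[1]
--     radius = width // 2
--
--     numOfRotations = (t%8)
--     for j in range(numOfRotations):
--         for i in range(radius):
--             temp = matrix[y-radius+i][x-radius+i]
--             matrix[y-radius+i][x-radius+i] = matrix[y][x-radius+i]
--             matrix[y][x-radius+i] = matrix[y+radius-i][x-radius+i]
--             matrix[y+radius-i][x-radius+i] = matrix[y+radius-i][x]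
--             matrix[y+radius-i][x] = matrix[y+radius-i][x+radius-i]
--             matrix[y+radius-i][x+radius-i] = matrix[y][x+radius-i]
--             matrix[y][x+radius-i] = matrix[y-radius+i][x+radius-i]
--             matrix[y-radius+i][x+radius-i] = matrix[y-radius+i][x]
--             matrix[y-radius+i][x] = temp
--
--     return matrix
-- ===== SOURCE B (Python) =====
-- def starRotation(matrix, width, center, t):
--     y = center[0]
--     x = center[1]
--     radius = width // 2
--     n = t % 8
--     for i in range(radius):
--         d = radius - i
--         coords = [(y - d, x - d), (y, x - d), (y + d, x - d), (y + d, x),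
--                   (y + d, x + d), (y, x + d), (y - d, x + d), (y - d, x)]
--         vals = [matrix[r][c] for (r, c) in coords]
--         for k, (r, c) in enumerate(coords):
--             matrix[r][c] = vals[(k + n) % 8]
--     return matrix
-- ===== Notes on version B (the rewrite author's own statement) =====
-- stated objective: alternative
-- what changed: A applies t%8 successive single-step ring rotations (an outer loop of in-place 8-cell shifts); B makes one pass per ring, gathering the 8 star values and scattering them back shifted by t%8 directly, removing the outer rotation loop.
-- outside the precondition, e.g. on starRotation([[1]], 3, [0, 0], 8): A returns [[1]], B raises IndexError
import Mathlib
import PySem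

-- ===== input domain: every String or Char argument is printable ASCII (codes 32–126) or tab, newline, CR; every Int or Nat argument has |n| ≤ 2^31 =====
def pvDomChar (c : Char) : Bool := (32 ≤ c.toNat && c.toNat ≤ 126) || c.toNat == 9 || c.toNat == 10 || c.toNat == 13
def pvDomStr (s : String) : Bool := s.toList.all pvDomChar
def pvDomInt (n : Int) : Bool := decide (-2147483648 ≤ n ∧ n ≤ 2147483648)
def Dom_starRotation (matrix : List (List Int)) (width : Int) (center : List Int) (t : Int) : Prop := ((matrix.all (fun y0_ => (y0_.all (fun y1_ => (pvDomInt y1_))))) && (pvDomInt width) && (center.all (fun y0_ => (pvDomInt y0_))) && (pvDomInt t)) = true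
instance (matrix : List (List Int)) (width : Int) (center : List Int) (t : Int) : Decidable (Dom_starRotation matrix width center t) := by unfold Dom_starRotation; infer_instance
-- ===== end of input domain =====

-- B replaces A's repeated single-step ring rotations (t%8 outer passes) by one gather-then-scatter
-- pass per ring applying the offset t%8 directly; both mutate `matrix` in place in Python, and the
-- equivalence proved here is about the returned value.

-- ===== PORT A =====

-- matrix[a][b]  (read; total form — Pre_ keeps every used index in range, so no wraparound/default fires)
def pvGetCell (m : List (List Int)) (a b : Int) : Int :=
  PySem.List.pyGetD (PySem.List.pyGetD m a []) b 0

-- matrix[a][b] = v  (write)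
def pvSetCell (m : List (List Int)) (a b : Int) (v : Int) : List (List Int) :=
  PySem.List.pySetD m a (PySem.List.pySetD (PySem.List.pyGetD m a []) b v)

-- the body of A's inner loop: one single-step rotation of the ring at distance radius-i
def pvStepA (y x radius : Int) (m : List (List Int)) (i : Int) : List (List Int) :=
  let temp := pvGetCell m (y-radius+i) (x-radius+i)
  let m1 := pvSetCell m (y-radius+i) (x-radius+i) (pvGetCell m y (x-radius+i))
  let m2 := pvSetCell m1 y (x-radius+i) (pvGetCell m1 (y+radius-i) (x-radius+i))
  let m3 := pvSetCell m2 (y+radius-i) (x-radius+i) (pvGetCell m2 (y+radius-i) x)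
  let m4 := pvSetCell m3 (y+radius-i) x (pvGetCell m3 (y+radius-i) (x+radius-i))
  let m5 := pvSetCell m4 (y+radius-i) (x+radius-i) (pvGetCell m4 y (x+radius-i))
  let m6 := pvSetCell m5 y (x+radius-i) (pvGetCell m5 (y-radius+i) (x+radius-i))
  let m7 := pvSetCell m6 (y-radius+i) (x+radius-i) (pvGetCell m6 (y-radius+i) x)
  pvSetCell m7 (y-radius+i) x temp

def starRotation (matrix : List (List Int)) (width : Int) (center : List Int) (t : Int) : List (List Int) :=
  let y := PySem.List.pyGetD center 0 0
  let x := PySem.List.pyGetD center 1 0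
  let radius := PySem.Int.floordiv width 2
  let numOfRotations := PySem.Int.mod t 8
  (PySem.List.pyRange 0 numOfRotations 1).foldl
    (fun m _ => (PySem.List.pyRange 0 radius 1).foldl (pvStepA y x radius) m) matrix

-- ===== PORT B =====

-- the 8 star coordinates of the ring at distance d, in A's traversal order
def pvCoords (y x d : Int) : List (Int × Int) :=
  [(y-d, x-d), (y, x-d), (y+d, x-d), (y+d, x), (y+d, x+d), (y, x+d), (y-d, x+d), (y-d, x)]

-- the body of B's loop: gather the ring's 8 values, scatter them back shifted by n
def pvRingB (y x n radius : Int) (m : List (List Int)) (i : Int) : List (List Int) :=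
  let d := radius - i
  let cs := pvCoords y x d
  let vals := cs.map (fun p => pvGetCell m p.1 p.2)
  (PySem.List.enumerate cs).foldl
    (fun m kp => pvSetCell m kp.2.1 kp.2.2 (PySem.List.pyGetD vals (PySem.Int.mod (kp.1 + n) 8) 0)) m

def starRotation_alt (matrix : List (List Int)) (width : Int) (center : List Int) (t : Int) : List (List Int) :=
  let y := PySem.List.pyGetD center 0 0
  let x := PySem.List.pyGetD center 1 0
  let radius := PySem.Int.floordiv width 2
  let n := PySem.Int.mod t 8
  (PySem.List.pyRange 0 radius 1).foldl (pvRingB y x n radius) matrix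

-- ===== PRECONDITION & SPEC =====

-- length of row r of the matrix, as an integer
def pvRowLenI (matrix : List (List Int)) (r : Int) : Int :=
  ((PySem.List.pyGetD matrix r []).length : Int)

-- Pre_ excludes inputs on which A raises (center shorter than 2, or a star index outside Python's
-- wrap range — B additionally reads the ring even when t%8 = 0, so B raises on some of those), and
-- inputs where a star index is negative, on which Python's negative-index wraparound can alias star
-- cells and A's interleaved single-step writes produce an accidental result.  Stated in closed form:
-- every star row y-radius..y+radius exists, and row y-d / y / y+d each reach column x+d.
def Pre_starRotation (matrix : List (List Int)) (width : Int) (center : List Int) (t : Int) : Prop :=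
  2 ≤ center.length ∧
  (PySem.Int.floordiv width 2 ≤ 0 ∨
    (0 ≤ PySem.List.pyGetD center 0 0 - PySem.Int.floordiv width 2 ∧
     PySem.List.pyGetD center 0 0 + PySem.Int.floordiv width 2 < (matrix.length : Int) ∧
     0 ≤ PySem.List.pyGetD center 1 0 - PySem.Int.floordiv width 2 ∧
     PySem.List.pyGetD center 1 0 + PySem.Int.floordiv width 2
       < pvRowLenI matrix (PySem.List.pyGetD center 0 0) ∧
     ∀ r ∈ PySem.List.pyRange (PySem.List.pyGetD center 0 0 - PySem.Int.floordiv width 2)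
         (PySem.List.pyGetD center 0 0 + PySem.Int.floordiv width 2 + 1) 1,
       PySem.List.pyGetD center 1 0 + |PySem.List.pyGetD center 0 0 - r| < pvRowLenI matrix r))

instance (matrix : List (List Int)) (width : Int) (center : List Int) (t : Int) : Decidable (Pre_starRotation matrix width center t) := by
  unfold Pre_starRotation; infer_instance

def pvWitness_starRotation : List (List Int) × Int × List Int × Int :=
  ([[1, 2, 3], [4, 5, 6], [7, 8, 9]], 3, [1, 1], 1)

def Spec_starRotation (matrix : List (List Int)) (width : Int) (center : List Int) (t : Int) (out : List (List Int)) : Prop := out = starRotation_alt matrix width center t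
instance (matrix : List (List Int)) (width : Int) (center : List Int) (t : Int) (out : List (List Int)) : Decidable (Spec_starRotation matrix width center t out) := by unfold Spec_starRotation; infer_instance

-- ===== CLAIM (what is proved, stated in full; the proofs are below) =====
def Claim_equal_starRotation : Prop := ∀ (matrix : List (List Int)) (width : Int) (center : List Int) (t : Int), Dom_starRotation matrix width center t → Pre_starRotation matrix width center t → Spec_starRotation matrix width center t (starRotation matrix width center t)

-- ===== LEMMAS AND PROOFS =====

-- cell p of m is genuinely in range (no negative-index wraparound; proof-side notion)
def pvInR (m : List (List Int)) (p : Int × Int) : Prop :=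
  0 ≤ p.1 ∧ p.1 < (m.length : Int) ∧ 0 ≤ p.2 ∧ p.2 < ((PySem.List.pyGetD m p.1 []).length : Int)

-- shape of a matrix: the list of its row lengths
def pvSh (m m' : List (List Int)) : Prop := m.map List.length = m'.map List.length

theorem pvSh_refl (m : List (List Int)) : pvSh m m := rfl

theorem pvSh_len {m m' : List (List Int)} (h : pvSh m m') : m.length = m'.length := by
  have := congrArg List.length h; simpa using this

theorem pvRowLen_eq (m : List (List Int)) (a : Nat) :
    (m.getD a []).length = (m.map List.length).getD a 0 := by
  rcases h : m[a]? with _ | row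
  · simp [List.getD_eq_getElem?_getD, h, List.getElem?_map]
  · simp [List.getD_eq_getElem?_getD, h, List.getElem?_map]

theorem pvGetCell_eq {a b : Int} (m : List (List Int)) (ha : 0 ≤ a) (hb : 0 ≤ b) :
    pvGetCell m a b = (m.getD a.toNat []).getD b.toNat 0 := by
  simp [pvGetCell, PySem.List.pyGetD_of_nonneg, ha, hb]

theorem pvSetCell_eq {a b : Int} (m : List (List Int)) (v : Int) (ha : 0 ≤ a) (hb : 0 ≤ b) :
    pvSetCell m a b v = m.set a.toNat ((m.getD a.toNat []).set b.toNat v) := by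
  simp [pvSetCell, PySem.List.pySetD_of_nonneg, PySem.List.pyGetD_of_nonneg, ha, hb]

theorem pvSh_set {a b : Int} (m : List (List Int)) (v : Int) (ha : 0 ≤ a) (hb : 0 ≤ b) :
    pvSh m (pvSetCell m a b v) := by
  rw [pvSetCell_eq m v ha hb]
  unfold pvSh
  by_cases h : a.toNat < m.length
  · rw [List.map_set]
    have hrow : m.getD a.toNat [] = m[a.toNat] := List.getD_eq_getElem m [] h
    rw [hrow]
    have : ((m[a.toNat].set b.toNat v)).length = (m.map List.length)[a.toNat]'(by simpa using h) := by
      rw [List.length_set]; exact (List.getElem_map List.length).symm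
    rw [this, List.set_getElem_self]
  · rw [List.set_eq_of_length_le (by omega)]

-- cell p of m is genuinely in range: InR transfers along equal shapes
theorem pvInR_transfer {m m' : List (List Int)} (h : pvSh m m') (p : Int × Int) :
    pvInR m p → pvInR m' p := by
  rintro ⟨h1, h2, h3, h4⟩
  refine ⟨h1, by rw [← pvSh_len h]; exact h2, h3, ?_⟩
  rw [PySem.List.pyGetD_of_nonneg _ _ h1] at h4 ⊢
  rw [pvRowLen_eq, ← h, ← pvRowLen_eq]
  exact h4

theorem pvGet_pvSet {a b : Int} {m : List (List Int)} (h : pvInR m (a, b))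
    (a' b' : Int) (ha' : 0 ≤ a') (hb' : 0 ≤ b') (v : Int) :
    pvGetCell (pvSetCell m a b v) a' b' =
      if a' = a ∧ b' = b then v else pvGetCell m a' b' := by
  obtain ⟨ha, hal, hb, hbl⟩ := h
  simp only at ha hal hb hbl
  rw [PySem.List.pyGetD_of_nonneg _ _ ha] at hbl
  rw [pvSetCell_eq m v ha hb, pvGetCell_eq _ ha' hb', pvGetCell_eq _ ha' hb']
  by_cases h1 : a' = a
  · subst h1
    have hlt : a'.toNat < m.length := by omega
    have hget : (m.set a'.toNat ((m.getD a'.toNat []).set b.toNat v)).getD a'.toNat [] =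
        (m.getD a'.toNat []).set b.toNat v := by
      rw [List.getD_eq_getElem?_getD, List.getElem?_set_self hlt]
      simp
    rw [hget]
    by_cases h2 : b' = b
    · subst h2
      rw [if_pos ⟨rfl, rfl⟩]
      have hblt : b'.toNat < (m.getD a'.toNat []).length := by omega
      rw [List.getD_eq_getElem?_getD, List.getElem?_set_self hblt]
      simp
    · rw [if_neg (by tauto)]
      rw [List.getD_eq_getElem?_getD, List.getD_eq_getElem?_getD,
        List.getElem?_set_ne (by omega)]
      simp [List.getD_eq_getElem?_getD]
  · rw [if_neg (by tauto)]
    have : (m.set a.toNat ((m.getD a.toNat []).set b.toNat v)).getD a'.toNat [] =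
        m.getD a'.toNat [] := by
      rw [List.getD_eq_getElem?_getD, List.getD_eq_getElem?_getD,
        List.getElem?_set_ne (by omega)]
      simp [List.getD_eq_getElem?_getD]
    rw [this]

-- the j-th star cell of the ring at distance d (j < 8), in A's traversal order
def pvCell (y x d : Int) : Nat → Int × Int
  | 0 => (y-d, x-d)
  | 1 => (y, x-d)
  | 2 => (y+d, x-d)
  | 3 => (y+d, x)
  | 4 => (y+d, x+d)
  | 5 => (y, x+d)
  | 6 => (y-d, x+d)
  | _ => (y-d, x)

theorem pvCell_ne {y x d d' : Int} {j j' : Nat} (hd : 1 ≤ d) (hd' : 1 ≤ d')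
    (hj : j < 8) (hj' : j' < 8) (hne : ¬(d = d' ∧ j = j')) :
    pvCell y x d j ≠ pvCell y x d' j' := by
  interval_cases j <;> interval_cases j' <;>
    simp_all [pvCell, Prod.ext_iff] <;> omega

-- one ring-local rewrite: m' is m with the ring at distance d rotated by nn positions
def pvRingChar (y x d : Int) (nn : Nat) (m m' : List (List Int)) : Prop :=
  pvSh m m' ∧
  (∀ j, j < 8 → pvGetCell m' (pvCell y x d j).1 (pvCell y x d j).2
      = pvGetCell m (pvCell y x d ((j+nn)%8)).1 (pvCell y x d ((j+nn)%8)).2) ∧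
  (∀ a b : Int, 0 ≤ a → 0 ≤ b → (∀ j, j < 8 → (a,b) ≠ pvCell y x d j) →
      pvGetCell m' a b = pvGetCell m a b)

-- writing a list of (cell, value) pairs in order
def pvScat (m : List (List Int)) (l : List ((Int × Int) × Int)) : List (List Int) :=
  l.foldl (fun mm pv => pvSetCell mm pv.1.1 pv.1.2 pv.2) m

theorem pvScat_cons (m : List (List Int)) (e : (Int × Int) × Int) (l : List ((Int × Int) × Int)) :
    pvScat m (e :: l) = pvScat (pvSetCell m e.1.1 e.1.2 e.2) l := rfl

theorem pvScat_sh (l : List ((Int × Int) × Int)) (m : List (List Int))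
    (h : ∀ pv ∈ l, 0 ≤ pv.1.1 ∧ 0 ≤ pv.1.2) : pvSh m (pvScat m l) := by
  induction l generalizing m with
  | nil => exact pvSh_refl m
  | cons e l ih =>
    rw [pvScat_cons]
    obtain ⟨h1, h2⟩ := h e (by simp)
    exact (pvSh_set m e.2 h1 h2).trans (ih _ (fun pv hpv => h pv (by simp [hpv])))

theorem pvScat_get_ne (l : List ((Int × Int) × Int)) (m : List (List Int)) {a b : Int}
    (hl : ∀ pv ∈ l, pvInR m pv.1) (ha : 0 ≤ a) (hb : 0 ≤ b)
    (hne : ∀ pv ∈ l, (a, b) ≠ pv.1) :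
    pvGetCell (pvScat m l) a b = pvGetCell m a b := by
  induction l generalizing m with
  | nil => rfl
  | cons e l ih =>
    rw [pvScat_cons]
    have he := hl e (by simp)
    have hsh : pvSh m (pvSetCell m e.1.1 e.1.2 e.2) := pvSh_set m e.2 he.1 he.2.2.1
    rw [ih _ (fun pv hpv => pvInR_transfer hsh _ (hl pv (by simp [hpv])))
        (fun pv hpv => hne pv (by simp [hpv]))]
    have he' : pvInR m (e.1.1, e.1.2) := he
    rw [pvGet_pvSet he' a b ha hb, if_neg ?_]
    intro ⟨h1, h2⟩
    exact hne e (by simp) (by rw [h1, h2])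

theorem pvScat_get_mem (l : List ((Int × Int) × Int)) (m : List (List Int))
    (hl : ∀ pv ∈ l, pvInR m pv.1)
    (hpw : l.Pairwise (fun p q => p.1 ≠ q.1))
    (e : (Int × Int) × Int) (he : e ∈ l) :
    pvGetCell (pvScat m l) e.1.1 e.1.2 = e.2 := by
  induction l generalizing m with
  | nil => simp at he
  | cons f l ih =>
    rw [pvScat_cons]
    have hf := hl f (by simp)
    have hsh : pvSh m (pvSetCell m f.1.1 f.1.2 f.2) := pvSh_set m f.2 hf.1 hf.2.2.1
    rcases List.mem_cons.mp he with rfl | he'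
    · have hne : ∀ pv ∈ l, (e.1.1, e.1.2) ≠ pv.1 := by
        intro pv hpv
        have := (List.pairwise_cons.mp hpw).1 pv hpv
        simpa using this
      rw [pvScat_get_ne _ _ (fun pv hpv => pvInR_transfer hsh _ (hl pv (by simp [hpv])))
          hf.1 hf.2.2.1 hne]
      have he' : pvInR m (e.1.1, e.1.2) := hf
      rw [pvGet_pvSet he' e.1.1 e.1.2 hf.1 hf.2.2.1, if_pos ⟨rfl, rfl⟩]
    · exact ih _ (fun pv hpv => pvInR_transfer hsh _ (hl pv (by simp [hpv])))
        (List.Pairwise.of_cons hpw) he'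

-- the gather-then-scatter write list for the ring at distance d with offset nn
def pvRingL (y x d : Int) (nn : Nat) (m : List (List Int)) : List ((Int × Int) × Int) :=
  (List.range 8).map (fun k => (pvCell y x d k,
    pvGetCell m (pvCell y x d ((k + nn) % 8)).1 (pvCell y x d ((k + nn) % 8)).2))

theorem pvRingL_mem {y x d : Int} {nn : Nat} {m : List (List Int)}
    {pv : (Int × Int) × Int} (h : pv ∈ pvRingL y x d nn m) :
    ∃ k, k < 8 ∧ pv = (pvCell y x d k,
      pvGetCell m (pvCell y x d ((k + nn) % 8)).1 (pvCell y x d ((k + nn) % 8)).2) := by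
  simp only [pvRingL, List.mem_map, List.mem_range] at h
  obtain ⟨k, hk, rfl⟩ := h
  exact ⟨k, hk, rfl⟩

theorem pvRingL_pairwise {y x d : Int} (hd : 1 ≤ d) (nn : Nat) (m : List (List Int)) :
    (pvRingL y x d nn m).Pairwise (fun p q => p.1 ≠ q.1) := by
  rw [List.pairwise_iff_getElem]
  intro i j hi hj hij
  simp only [pvRingL, List.length_map, List.length_range] at hi hj
  simp only [pvRingL, List.getElem_map, List.getElem_range]
  exact pvCell_ne hd hd hi hj (by omega)

theorem pvScat_ringL_char {y x d : Int} {nn : Nat} {m : List (List Int)} (hd : 1 ≤ d)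
    (H : ∀ j, j < 8 → pvInR m (pvCell y x d j)) :
    pvRingChar y x d nn m (pvScat m (pvRingL y x d nn m)) := by
  have hInR : ∀ pv ∈ pvRingL y x d nn m, pvInR m pv.1 := by
    intro pv hpv
    obtain ⟨k, hk, rfl⟩ := pvRingL_mem hpv
    exact H k hk
  refine ⟨?_, ?_, ?_⟩
  · exact pvScat_sh _ _ (fun pv hpv => ⟨(hInR pv hpv).1, (hInR pv hpv).2.2.1⟩)
  · intro j hj
    have hmem : (pvCell y x d j,
        pvGetCell m (pvCell y x d ((j + nn) % 8)).1 (pvCell y x d ((j + nn) % 8)).2)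
        ∈ pvRingL y x d nn m := by
      simp only [pvRingL, List.mem_map, List.mem_range]
      exact ⟨j, hj, rfl⟩
    exact pvScat_get_mem _ _ hInR (pvRingL_pairwise hd nn m) _ hmem
  · intro a b ha hb hne
    refine pvScat_get_ne _ _ hInR ha hb ?_
    intro pv hpv
    obtain ⟨k, hk, rfl⟩ := pvRingL_mem hpv
    exact hne k hk

-- pvStepA with the substitution d = radius - i (proof-side restatement of A's loop body)
def pvStep2 (y x d : Int) (m : List (List Int)) : List (List Int) :=
  let temp := pvGetCell m (y-d) (x-d)
  let m1 := pvSetCell m (y-d) (x-d) (pvGetCell m y (x-d))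
  let m2 := pvSetCell m1 y (x-d) (pvGetCell m1 (y+d) (x-d))
  let m3 := pvSetCell m2 (y+d) (x-d) (pvGetCell m2 (y+d) x)
  let m4 := pvSetCell m3 (y+d) x (pvGetCell m3 (y+d) (x+d))
  let m5 := pvSetCell m4 (y+d) (x+d) (pvGetCell m4 y (x+d))
  let m6 := pvSetCell m5 y (x+d) (pvGetCell m5 (y-d) (x+d))
  let m7 := pvSetCell m6 (y-d) (x+d) (pvGetCell m6 (y-d) x)
  pvSetCell m7 (y-d) x temp

theorem pvStepA_eq_step2 (y x rad i : Int) (m : List (List Int)) :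
    pvStepA y x rad m i = pvStep2 y x (rad - i) m := by
  have h1 : y - rad + i = y - (rad - i) := by ring
  have h2 : y + rad - i = y + (rad - i) := by ring
  have h3 : x - rad + i = x - (rad - i) := by ring
  have h4 : x + rad - i = x + (rad - i) := by ring
  simp only [pvStepA, pvStep2, h1, h2, h3, h4]

theorem pvRingL_one (y x d : Int) (m : List (List Int)) : pvRingL y x d 1 m =
    [((y-d,x-d), pvGetCell m y (x-d)),
     ((y,x-d), pvGetCell m (y+d) (x-d)),
     ((y+d,x-d), pvGetCell m (y+d) x),
     ((y+d,x), pvGetCell m (y+d) (x+d)),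
     ((y+d,x+d), pvGetCell m y (x+d)),
     ((y,x+d), pvGetCell m (y-d) (x+d)),
     ((y-d,x+d), pvGetCell m (y-d) x),
     ((y-d,x), pvGetCell m (y-d) (x-d))] := by
  simp [pvRingL, pvCell, List.range_succ]

theorem pvStep2_eq_scat {y x d : Int} {m : List (List Int)} (hd : 1 ≤ d)
    (H : ∀ j, j < 8 → pvInR m (pvCell y x d j)) :
    pvStep2 y x d m = pvScat m (pvRingL y x d 1 m) := by
  have h0 := H 0 (by norm_num)
  have h1 := H 1 (by norm_num)
  have h3 := H 3 (by norm_num)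
  have h4 := H 4 (by norm_num)
  simp only [pvCell] at h0 h1 h3 h4
  have pYm : (0:Int) ≤ y - d := h0.1
  have pXm : (0:Int) ≤ x - d := h0.2.2.1
  have pY : (0:Int) ≤ y := h1.1
  have pX : (0:Int) ≤ x := h3.2.2.1
  have pYp : (0:Int) ≤ y + d := h4.1
  have pXp : (0:Int) ≤ x + d := h4.2.2.1
  have Sh1 : pvSh m (pvSetCell m (y-d) (x-d) (pvGetCell m y (x-d))) := (pvSh_set m _ pYm pXm)
  have I1 : ∀ j, j < 8 → pvInR (pvSetCell m (y-d) (x-d) (pvGetCell m y (x-d))) (pvCell y x d j) := fun j hj => pvInR_transfer Sh1 _ (H j hj)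
  have Sh2 : pvSh m (pvSetCell (pvSetCell m (y-d) (x-d) (pvGetCell m y (x-d))) y (x-d) (pvGetCell m (y+d) (x-d))) := Sh1.trans (pvSh_set (pvSetCell m (y-d) (x-d) (pvGetCell m y (x-d))) _ pY pXm)
  have I2 : ∀ j, j < 8 → pvInR (pvSetCell (pvSetCell m (y-d) (x-d) (pvGetCell m y (x-d))) y (x-d) (pvGetCell m (y+d) (x-d))) (pvCell y x d j) := fun j hj => pvInR_transfer Sh2 _ (H j hj)
  have Sh3 : pvSh m (pvSetCell (pvSetCell (pvSetCell m (y-d) (x-d) (pvGetCell m y (x-d))) y (x-d) (pvGetCell m (y+d) (x-d))) (y+d) (x-d) (pvGetCell m (y+d) x)) := Sh2.trans (pvSh_set (pvSetCell (pvSetCell m (y-d) (x-d) (pvGetCell m y (x-d))) y (x-d) (pvGetCell m (y+d) (x-d))) _ pYp pXm)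
  have I3 : ∀ j, j < 8 → pvInR (pvSetCell (pvSetCell (pvSetCell m (y-d) (x-d) (pvGetCell m y (x-d))) y (x-d) (pvGetCell m (y+d) (x-d))) (y+d) (x-d) (pvGetCell m (y+d) x)) (pvCell y x d j) := fun j hj => pvInR_transfer Sh3 _ (H j hj)
  have Sh4 : pvSh m (pvSetCell (pvSetCell (pvSetCell (pvSetCell m (y-d) (x-d) (pvGetCell m y (x-d))) y (x-d) (pvGetCell m (y+d) (x-d))) (y+d) (x-d) (pvGetCell m (y+d) x)) (y+d) x (pvGetCell m (y+d) (x+d))) := Sh3.trans (pvSh_set (pvSetCell (pvSetCell (pvSetCell m (y-d) (x-d) (pvGetCell m y (x-d))) y (x-d) (pvGetCell m (y+d) (x-d))) (y+d) (x-d) (pvGetCell m (y+d) x)) _ pYp pX)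
  have I4 : ∀ j, j < 8 → pvInR (pvSetCell (pvSetCell (pvSetCell (pvSetCell m (y-d) (x-d) (pvGetCell m y (x-d))) y (x-d) (pvGetCell m (y+d) (x-d))) (y+d) (x-d) (pvGetCell m (y+d) x)) (y+d) x (pvGetCell m (y+d) (x+d))) (pvCell y x d j) := fun j hj => pvInR_transfer Sh4 _ (H j hj)
  have Sh5 : pvSh m (pvSetCell (pvSetCell (pvSetCell (pvSetCell (pvSetCell m (y-d) (x-d) (pvGetCell m y (x-d))) y (x-d) (pvGetCell m (y+d) (x-d))) (y+d) (x-d) (pvGetCell m (y+d) x)) (y+d) x (pvGetCell m (y+d) (x+d))) (y+d) (x+d) (pvGetCell m y (x+d))) := Sh4.trans (pvSh_set (pvSetCell (pvSetCell (pvSetCell (pvSetCell m (y-d) (x-d) (pvGetCell m y (x-d))) y (x-d) (pvGetCell m (y+d) (x-d))) (y+d) (x-d) (pvGetCell m (y+d) x)) (y+d) x (pvGetCell m (y+d) (x+d))) _ pYp pXp)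
  have I5 : ∀ j, j < 8 → pvInR (pvSetCell (pvSetCell (pvSetCell (pvSetCell (pvSetCell m (y-d) (x-d) (pvGetCell m y (x-d))) y (x-d) (pvGetCell m (y+d) (x-d))) (y+d) (x-d) (pvGetCell m (y+d) x)) (y+d) x (pvGetCell m (y+d) (x+d))) (y+d) (x+d) (pvGetCell m y (x+d))) (pvCell y x d j) := fun j hj => pvInR_transfer Sh5 _ (H j hj)
  have Sh6 : pvSh m (pvSetCell (pvSetCell (pvSetCell (pvSetCell (pvSetCell (pvSetCell m (y-d) (x-d) (pvGetCell m y (x-d))) y (x-d) (pvGetCell m (y+d) (x-d))) (y+d) (x-d) (pvGetCell m (y+d) x)) (y+d) x (pvGetCell m (y+d) (x+d))) (y+d) (x+d) (pvGetCell m y (x+d))) y (x+d) (pvGetCell m (y-d) (x+d))) := Sh5.trans (pvSh_set (pvSetCell (pvSetCell (pvSetCell (pvSetCell (pvSetCell m (y-d) (x-d) (pvGetCell m y (x-d))) y (x-d) (pvGetCell m (y+d) (x-d))) (y+d) (x-d) (pvGetCell m (y+d) x)) (y+d) x (pvGetCell m (y+d) (x+d))) (y+d) (x+d) (pvGetCell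 m y (x+d))) _ pY pXp)
  have I6 : ∀ j, j < 8 → pvInR (pvSetCell (pvSetCell (pvSetCell (pvSetCell (pvSetCell (pvSetCell m (y-d) (x-d) (pvGetCell m y (x-d))) y (x-d) (pvGetCell m (y+d) (x-d))) (y+d) (x-d) (pvGetCell m (y+d) x)) (y+d) x (pvGetCell m (y+d) (x+d))) (y+d) (x+d) (pvGetCell m y (x+d))) y (x+d) (pvGetCell m (y-d) (x+d))) (pvCell y x d j) := fun j hj => pvInR_transfer Sh6 _ (H j hj)
  have R1 : pvGetCell (pvSetCell m (y-d) (x-d) (pvGetCell m y (x-d))) (y+d) (x-d) = pvGetCell m (y+d) (x-d) := by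
    rw [pvGet_pvSet (by simpa [pvCell] using H 0 (by norm_num)) _ _ pYp pXm, if_neg (by omega)]
  have R2 : pvGetCell (pvSetCell (pvSetCell m (y-d) (x-d) (pvGetCell m y (x-d))) y (x-d) (pvGetCell m (y+d) (x-d))) (y+d) x = pvGetCell m (y+d) x := by
    rw [pvGet_pvSet (by simpa [pvCell] using I1 1 (by norm_num)) _ _ pYp pX, if_neg (by omega), pvGet_pvSet (by simpa [pvCell] using H 0 (by norm_num)) _ _ pYp pX, if_neg (by omega)]
  have R3 : pvGetCell (pvSetCell (pvSetCell (pvSetCell m (y-d) (x-d) (pvGetCell m y (x-d))) y (x-d) (pvGetCell m (y+d) (x-d))) (y+d) (x-d) (pvGetCell m (y+d) x)) (y+d) (x+d) = pvGetCell m (y+d) (x+d) := by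
    rw [pvGet_pvSet (by simpa [pvCell] using I2 2 (by norm_num)) _ _ pYp pXp, if_neg (by omega), pvGet_pvSet (by simpa [pvCell] using I1 1 (by norm_num)) _ _ pYp pXp, if_neg (by omega), pvGet_pvSet (by simpa [pvCell] using H 0 (by norm_num)) _ _ pYp pXp, if_neg (by omega)]
  have R4 : pvGetCell (pvSetCell (pvSetCell (pvSetCell (pvSetCell m (y-d) (x-d) (pvGetCell m y (x-d))) y (x-d) (pvGetCell m (y+d) (x-d))) (y+d) (x-d) (pvGetCell m (y+d) x)) (y+d) x (pvGetCell m (y+d) (x+d))) y (x+d) = pvGetCell m y (x+d) := by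
    rw [pvGet_pvSet (by simpa [pvCell] using I3 3 (by norm_num)) _ _ pY pXp, if_neg (by omega), pvGet_pvSet (by simpa [pvCell] using I2 2 (by norm_num)) _ _ pY pXp, if_neg (by omega), pvGet_pvSet (by simpa [pvCell] using I1 1 (by norm_num)) _ _ pY pXp, if_neg (by omega), pvGet_pvSet (by simpa [pvCell] using H 0 (by norm_num)) _ _ pY pXp, if_neg (by omega)]
  have R5 : pvGetCell (pvSetCell (pvSetCell (pvSetCell (pvSetCell (pvSetCell m (y-d) (x-d) (pvGetCell m y (x-d))) y (x-d) (pvGetCell m (y+d) (x-d))) (y+d) (x-d) (pvGetCell m (y+d) x)) (y+d) x (pvGetCell m (y+d) (x+d))) (y+d) (x+d) (pvGetCell m y (x+d))) (y-d) (x+d) = pvGetCell m (y-d) (x+d) := by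
    rw [pvGet_pvSet (by simpa [pvCell] using I4 4 (by norm_num)) _ _ pYm pXp, if_neg (by omega), pvGet_pvSet (by simpa [pvCell] using I3 3 (by norm_num)) _ _ pYm pXp, if_neg (by omega), pvGet_pvSet (by simpa [pvCell] using I2 2 (by norm_num)) _ _ pYm pXp, if_neg (by omega), pvGet_pvSet (by simpa [pvCell] using I1 1 (by norm_num)) _ _ pYm pXp, if_neg (by omega), pvGet_pvSet (by simpa [pvCell] using H 0 (by norm_num)) _ _ pYm pXp, if_neg (by omega)]
  have R6 : pvGetCell (pvSetCell (pvSetCell (pvSetCell (pvSetCell (pvSetCell (pvSetCell m (y-d) (x-d) (pvGetCell m y (x-d))) y (x-d) (pvGetCell m (y+d) (x-d))) (y+d) (x-d) (pvGetCell m (y+d) x)) (y+d) x (pvGetCell m (y+d) (x+d))) (y+d) (x+d) (pvGetCell m y (x+d))) y (x+d) (pvGetCell m (y-d) (x+d))) (y-d) x = pvGetCell m (y-d) x := by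
    rw [pvGet_pvSet (by simpa [pvCell] using I5 5 (by norm_num)) _ _ pYm pX, if_neg (by omega), pvGet_pvSet (by simpa [pvCell] using I4 4 (by norm_num)) _ _ pYm pX, if_neg (by omega), pvGet_pvSet (by simpa [pvCell] using I3 3 (by norm_num)) _ _ pYm pX, if_neg (by omega), pvGet_pvSet (by simpa [pvCell] using I2 2 (by norm_num)) _ _ pYm pX, if_neg (by omega), pvGet_pvSet (by simpa [pvCell] using I1 1 (by norm_num)) _ _ pYm pX, if_neg (by omega), pvGet_pvSet (by simpa [pvCell] using H 0 (by norm_num)) _ _ pYm pX, if_neg (by omega)]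
  simp only [pvStep2]
  rw [pvRingL_one]
  simp only [pvScat, List.foldl]
  rw [R1]
  rw [R2]
  rw [R3]
  rw [R4]
  rw [R5]
  rw [R6]

theorem pvStepA_char (y x rad i : Int) (m : List (List Int)) (hd : 1 ≤ rad - i)
    (H : ∀ j, j < 8 → pvInR m (pvCell y x (rad - i) j)) :
    pvRingChar y x (rad - i) 1 m (pvStepA y x rad m i) := by
  rw [pvStepA_eq_step2, pvStep2_eq_scat hd H]
  exact pvScat_ringL_char hd H

theorem pvRingL_expand (y x d : Int) (nn : Nat) (m : List (List Int)) :
    pvRingL y x d nn m =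
    [((y-d,x-d), pvGetCell m (pvCell y x d ((0+nn)%8)).1 (pvCell y x d ((0+nn)%8)).2),
     ((y,x-d),   pvGetCell m (pvCell y x d ((1+nn)%8)).1 (pvCell y x d ((1+nn)%8)).2),
     ((y+d,x-d), pvGetCell m (pvCell y x d ((2+nn)%8)).1 (pvCell y x d ((2+nn)%8)).2),
     ((y+d,x),   pvGetCell m (pvCell y x d ((3+nn)%8)).1 (pvCell y x d ((3+nn)%8)).2),
     ((y+d,x+d), pvGetCell m (pvCell y x d ((4+nn)%8)).1 (pvCell y x d ((4+nn)%8)).2),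
     ((y,x+d),   pvGetCell m (pvCell y x d ((5+nn)%8)).1 (pvCell y x d ((5+nn)%8)).2),
     ((y-d,x+d), pvGetCell m (pvCell y x d ((6+nn)%8)).1 (pvCell y x d ((6+nn)%8)).2),
     ((y-d,x),   pvGetCell m (pvCell y x d ((7+nn)%8)).1 (pvCell y x d ((7+nn)%8)).2)] := by
  simp only [pvRingL, List.range_succ]
  norm_num [pvCell]

theorem pvRingB_eq_scat {y x n rad i : Int} {m : List (List Int)} (hn0 : 0 ≤ n) (hn8 : n < 8) :
    pvRingB y x n rad m i = pvScat m (pvRingL y x (rad - i) n.toNat m) := by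
  have V : ∀ (k : Nat) (kk : Int), kk = (k : Int) → k < 8 →
      PySem.List.pyGetD
        [pvGetCell m (y - (rad-i)) (x - (rad-i)), pvGetCell m y (x - (rad-i)),
         pvGetCell m (y + (rad-i)) (x - (rad-i)), pvGetCell m (y + (rad-i)) x,
         pvGetCell m (y + (rad-i)) (x + (rad-i)), pvGetCell m y (x + (rad-i)),
         pvGetCell m (y - (rad-i)) (x + (rad-i)), pvGetCell m (y - (rad-i)) x]
        (PySem.Int.mod (kk + n) 8) 0
      = pvGetCell m (pvCell y x (rad-i) ((k + n.toNat) % 8)).1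
          (pvCell y x (rad-i) ((k + n.toNat) % 8)).2 := by
    intro k kk hkk hk8
    subst hkk
    have hmod : PySem.Int.mod ((k : Int) + n) 8 = (((k + n.toNat) % 8 : Nat) : Int) := by
      rw [PySem.Int.mod_eq_emod_of_pos (by norm_num)]; omega
    rw [hmod, PySem.List.pyGetD_natCast]
    have hj : (k + n.toNat) % 8 < 8 := Nat.mod_lt _ (by norm_num)
    generalize (k + n.toNat) % 8 = j at hj ⊢
    interval_cases j <;> simp [pvCell]
  have V0 := V 0 (0) (by norm_num) (by norm_num)
  have V1 := V 1 (0+1) (by norm_num) (by norm_num)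
  have V2 := V 2 (0+1+1) (by norm_num) (by norm_num)
  have V3 := V 3 (0+1+1+1) (by norm_num) (by norm_num)
  have V4 := V 4 (0+1+1+1+1) (by norm_num) (by norm_num)
  have V5 := V 5 (0+1+1+1+1+1) (by norm_num) (by norm_num)
  have V6 := V 6 (0+1+1+1+1+1+1) (by norm_num) (by norm_num)
  have V7 := V 7 (0+1+1+1+1+1+1+1) (by norm_num) (by norm_num)
  rw [pvRingL_expand]
  simp only [pvRingB, pvCoords, PySem.List.enumerate_cons, PySem.List.enumerate_nil,
    List.map, List.foldl, pvScat]
  rw [V0, V1, V2, V3, V4, V5, V6, V7]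

theorem pvRingB_char {y x n rad i : Int} {m : List (List Int)} (hn0 : 0 ≤ n) (hn8 : n < 8)
    (hd : 1 ≤ rad - i) (H : ∀ j, j < 8 → pvInR m (pvCell y x (rad - i) j)) :
    pvRingChar y x (rad - i) n.toNat m (pvRingB y x n rad m i) := by
  rw [pvRingB_eq_scat hn0 hn8]
  exact pvScat_ringL_char hd H

-- m' is m with every ring d ∈ [1, v] rotated by nn, everything else untouched
def pvBigChar (y x : Int) (nn : Nat) (v : Int) (m m' : List (List Int)) : Prop :=
  pvSh m m' ∧
  (∀ d : Int, 1 ≤ d → d ≤ v → ∀ j, j < 8 →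
      pvGetCell m' (pvCell y x d j).1 (pvCell y x d j).2
        = pvGetCell m (pvCell y x d ((j+nn)%8)).1 (pvCell y x d ((j+nn)%8)).2) ∧
  (∀ a b : Int, 0 ≤ a → 0 ≤ b →
      (∀ d : Int, 1 ≤ d → d ≤ v → ∀ j, j < 8 → (a,b) ≠ pvCell y x d j) →
      pvGetCell m' a b = pvGetCell m a b)

theorem pvFold_rings (y x rad : Int) (nn : Nat) (op : List (List Int) → Int → List (List Int))
    (m₀ : List (List Int))
    (Hc : ∀ d : Int, 1 ≤ d → d ≤ rad → ∀ j, j < 8 → pvInR m₀ (pvCell y x d j))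
    (hop : ∀ (m : List (List Int)) (i : Int), pvSh m₀ m → 0 ≤ i → i < rad →
      pvRingChar y x (rad - i) nn m (op m i)) :
    ∀ (v : Nat), (v : Int) ≤ rad → ∀ (m : List (List Int)), pvSh m₀ m →
      pvBigChar y x nn (v : Int) m ((PySem.List.pyRange (rad - (v : Int)) rad 1).foldl op m) := by
  intro v
  induction v with
  | zero =>
    intro _ m _
    rw [show rad - ((0:Nat):Int) = rad by norm_num, PySem.List.pyRange_one_eq_nil (le_refl rad)]
    exact ⟨pvSh_refl m, fun d hd1 hd2 => by omega, fun a b _ _ _ => rfl⟩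
  | succ v ih =>
    intro hv m hsh
    have hlt : rad - ((v:Nat)+1:Int) < rad := by push_cast at hv ⊢; omega
    rw [show ((v+1:Nat):Int) = (v:Int)+1 by push_cast; ring] at *
    rw [PySem.List.pyRange_one_cons hlt, List.foldl_cons]
    set i0 : Int := rad - ((v:Int)+1) with hi0
    have hd0 : rad - i0 = (v:Int)+1 := by omega
    have hchar : pvRingChar y x ((v:Int)+1) nn m (op m i0) := by
      rw [← hd0]; exact hop m i0 hsh (by omega) (by omega)
    obtain ⟨csh, crot, cun⟩ := hchar
    have hsh1 : pvSh m₀ (op m i0) := hsh.trans csh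
    have hrest := ih (by omega) (op m i0) hsh1
    rw [show rad - ((v:Int)+1) + 1 = rad - (v:Int) by ring]
    obtain ⟨bsh, brot, bun⟩ := hrest
    -- cells of ring d are in range (needed for nonnegativity of coordinates)
    have hnn : ∀ (d : Int), 1 ≤ d → d ≤ rad → ∀ j, j < 8 →
        0 ≤ (pvCell y x d j).1 ∧ 0 ≤ (pvCell y x d j).2 := by
      intro d h1 h2 j hj
      exact ⟨(Hc d h1 h2 j hj).1, (Hc d h1 h2 j hj).2.2.1⟩
    refine ⟨csh.trans bsh, ?_, ?_⟩
    · intro d hd1 hd2 j hj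
      by_cases hcase : d ≤ (v:Int)
      · -- ring untouched by the first step, rotated by the rest
        rw [brot d hd1 hcase j hj]
        have hj' : (j+nn)%8 < 8 := Nat.mod_lt _ (by norm_num)
        obtain ⟨hna, hnb⟩ := hnn d hd1 (by omega) ((j+nn)%8) hj'
        exact cun (pvCell y x d ((j+nn)%8)).1 (pvCell y x d ((j+nn)%8)).2 hna hnb
          (fun j' hj' => by
            rw [Prod.mk.eta]
            exact pvCell_ne hd1 (by omega) ((j+nn).mod_lt (by norm_num) : (j+nn)%8 < 8) hj' (by omega))
      · have hdv : d = (v:Int)+1 := by omega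
        subst hdv
        obtain ⟨hna, hnb⟩ := hnn ((v:Int)+1) hd1 (by omega) j hj
        rw [bun (pvCell y x ((v:Int)+1) j).1 (pvCell y x ((v:Int)+1) j).2 hna hnb
          (fun d' hd'1 hd'2 j' hj' => by
            rw [Prod.mk.eta]
            exact pvCell_ne hd1 hd'1 hj hj' (by omega))]
        exact crot j hj
    · intro a b ha hb hne
      rw [bun a b ha hb (fun d hd1 hd2 j hj => hne d hd1 (by omega) j hj)]
      exact cun a b ha hb (fun j hj => hne ((v:Int)+1) (by omega) (by omega) j hj)

theorem pvInner_char (y x rad : Int) (nn : Nat) (op : List (List Int) → Int → List (List Int))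
    (m₀ : List (List Int))
    (hop : ∀ (m : List (List Int)) (i : Int), pvSh m₀ m → 0 ≤ i → i < rad →
      pvRingChar y x (rad - i) nn m (op m i)) :
    ∀ m, pvSh m₀ m → (∀ d : Int, 1 ≤ d → d ≤ rad → ∀ j, j < 8 → pvInR m₀ (pvCell y x d j)) →
      pvBigChar y x nn rad m ((PySem.List.pyRange 0 rad 1).foldl op m) := by
  intro m hsh Hc
  by_cases h : rad ≤ 0
  · rw [PySem.List.pyRange_one_eq_nil h]
    exact ⟨pvSh_refl m, fun d hd1 hd2 => by omega, fun a b _ _ _ => rfl⟩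
  · have h : 0 < rad := by omega
    have := pvFold_rings y x rad nn op m₀ Hc hop rad.toNat (by omega) m hsh
    rw [show rad - ((rad.toNat : Nat) : Int) = 0 by omega] at this
    rw [show ((rad.toNat : Nat) : Int) = rad by omega] at this
    exact this

theorem pvBigChar_compose {y x rad : Int} {k l : Nat} {m0 m1 m2 : List (List Int)}
    (h1 : pvBigChar y x k rad m0 m1) (h2 : pvBigChar y x l rad m1 m2) :
    pvBigChar y x (k + l) rad m0 m2 := by
  obtain ⟨s1, r1, u1⟩ := h1
  obtain ⟨s2, r2, u2⟩ := h2
  refine ⟨s1.trans s2, ?_, ?_⟩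
  · intro d hd1 hd2 j hj
    rw [r2 d hd1 hd2 j hj, r1 d hd1 hd2 ((j+l)%8) (Nat.mod_lt _ (by norm_num))]
    rw [show ((j+l)%8 + k)%8 = (j+(k+l))%8 by omega]
  · intro a b ha hb hne
    rw [u2 a b ha hb hne, u1 a b ha hb hne]

theorem pvBigChar_zero (y x rad : Int) (m : List (List Int)) : pvBigChar y x 0 rad m m := by
  refine ⟨pvSh_refl m, ?_, fun a b _ _ _ => rfl⟩
  intro d _ _ j hj
  rw [Nat.add_zero, Nat.mod_eq_of_lt hj]

theorem pvOuter (y x rad : Int) (m₀ : List (List Int))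
    (Hc : ∀ d : Int, 1 ≤ d → d ≤ rad → ∀ j, j < 8 → pvInR m₀ (pvCell y x d j)) :
    ∀ (l : List Int) (k : Nat) (m : List (List Int)), pvBigChar y x k rad m₀ m →
      pvBigChar y x (k + l.length) rad m₀
        (l.foldl (fun mm _ => (PySem.List.pyRange 0 rad 1).foldl (pvStepA y x rad) mm) m) := by
  intro l
  induction l with
  | nil => intro k m h; simpa using h
  | cons e l ih =>
    intro k m h
    rw [List.foldl_cons]
    have hstep : pvBigChar y x 1 rad m ((PySem.List.pyRange 0 rad 1).foldl (pvStepA y x rad) m) := by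
      refine pvInner_char y x rad 1 _ m₀ ?_ m h.1 Hc
      intro mm i hsh h0 hrad
      refine pvStepA_char y x rad i mm (by omega) ?_
      intro j hj
      exact pvInR_transfer hsh _ (Hc (rad - i) (by omega) (by omega) j hj)
    have := ih (k+1) _ (pvBigChar_compose h hstep)
    rw [show k + 1 + l.length = k + (l.length + 1) by omega] at this
    simpa using this

theorem pvMatEq {m' m'' : List (List Int)} (h : pvSh m' m'')
    (hg : ∀ a b : Nat, pvGetCell m' (a:Int) (b:Int) = pvGetCell m'' (a:Int) (b:Int)) :
    m' = m'' := by
  have key : ∀ (mm : List (List Int)) (i b : Nat) (hi : i < mm.length)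
      (hb : b < (mm[i]).length), pvGetCell mm (i:Int) (b:Int) = mm[i][b] := by
    intro mm i b hi hb
    rw [pvGetCell_eq mm (Int.natCast_nonneg i) (Int.natCast_nonneg b),
      Int.toNat_natCast, Int.toNat_natCast, List.getD_eq_getElem mm [] hi,
      List.getD_eq_getElem _ 0 hb]
  have hlen := pvSh_len h
  apply List.ext_getElem hlen
  intro i hi hi'
  have hrow : (m'[i]).length = (m''[i]).length := by
    have h1 : (m'.map List.length)[i]'(by simpa using hi) =
        (m''.map List.length)[i]'(by simpa using hi') := by
      congr 1
    simpa using h1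
  apply List.ext_getElem hrow
  intro b hb hb'
  rw [← key m' i b hi hb, ← key m'' i b hi' hb']
  exact hg i b

theorem pvBigChar_unique {y x rad : Int} {nn : Nat} {m₀ m' m'' : List (List Int)}
    (h' : pvBigChar y x nn rad m₀ m') (h'' : pvBigChar y x nn rad m₀ m'') : m' = m'' := by
  have hsh : pvSh m' m'' := h'.1.symm.trans h''.1
  refine pvMatEq hsh ?_
  intro a b
  by_cases hex : ∃ (d : Int) (j : Nat), 1 ≤ d ∧ d ≤ rad ∧ j < 8 ∧ ((a:Int), (b:Int)) = pvCell y x d j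
  · obtain ⟨d, j, h1, h2, h3, heq⟩ := hex
    have e1 : (a:Int) = (pvCell y x d j).1 := congrArg Prod.fst heq
    have e2 : (b:Int) = (pvCell y x d j).2 := congrArg Prod.snd heq
    rw [e1, e2, h'.2.1 d h1 h2 j h3, ← h''.2.1 d h1 h2 j h3]
  · push Not at hex
    have hne : ∀ d : Int, 1 ≤ d → d ≤ rad → ∀ j, j < 8 → ((a:Int), (b:Int)) ≠ pvCell y x d j :=
      fun d hd1 hd2 j hj => hex d j hd1 hd2 hj
    rw [h'.2.2 (a:Int) (b:Int) (Int.natCast_nonneg a) (Int.natCast_nonneg b) hne,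
      ← h''.2.2 (a:Int) (b:Int) (Int.natCast_nonneg a) (Int.natCast_nonneg b) hne]

-- ===== VERDICT (by name: the statement is the Claim_ definition above) =====
theorem starRotation_spec : Claim_equal_starRotation := by
  unfold Claim_equal_starRotation Spec_starRotation
  intro matrix width center t _ hpre
  obtain ⟨_, hpre2⟩ := hpre
  simp only [starRotation, starRotation_alt]
  set y := PySem.List.pyGetD center 0 0 with hy
  set x := PySem.List.pyGetD center 1 0 with hx
  set rad := PySem.Int.floordiv width 2 with hrad
  set n := PySem.Int.mod t 8 with hn
  have hn0 : 0 ≤ n := PySem.Int.mod_nonneg t (by norm_num)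
  have hn8 : n < 8 := PySem.Int.mod_lt t (by norm_num)
  have Hc : ∀ d : Int, 1 ≤ d → d ≤ rad → ∀ j, j < 8 → pvInR matrix (pvCell y x d j) := by
    intro d h1 h2 j hj
    rcases hpre2 with hneg | ⟨hy0, hylen, hx0, hxy, hrow⟩
    · omega
    · have hm1 : y - d ∈ PySem.List.pyRange (y - rad) (y + rad + 1) 1 := by
        rw [PySem.List.mem_pyRange_one]; omega
      have hm2 : y + d ∈ PySem.List.pyRange (y - rad) (y + rad + 1) 1 := by
        rw [PySem.List.mem_pyRange_one]; omega
      have hr1 := hrow (y - d) hm1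
      have hr2 := hrow (y + d) hm2
      rw [show y - (y - d) = d by ring, abs_of_nonneg (by omega : (0:Int) ≤ d)] at hr1
      rw [show y - (y + d) = -d by ring, abs_neg, abs_of_nonneg (by omega : (0:Int) ≤ d)] at hr2
      simp only [pvRowLenI] at hr1 hr2 hxy
      interval_cases j <;>
        · refine ⟨?_, ?_, ?_, ?_⟩ <;> simp only [pvCell] <;> omega
  have hA := pvOuter y x rad matrix Hc (PySem.List.pyRange 0 n 1) 0 matrix
    (pvBigChar_zero y x rad matrix)
  rw [PySem.List.length_pyRange_one] at hA
  have hlen : (n - 0).toNat = n.toNat := by norm_num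
  rw [hlen] at hA
  have hB := pvInner_char y x rad n.toNat (pvRingB y x n rad) matrix
    (fun mm i hsh h0 hilt => pvRingB_char hn0 hn8 (by omega)
      (fun j hj => pvInR_transfer hsh _ (Hc (rad - i) (by omega) (by omega) j hj)))
    matrix (pvSh_refl matrix) Hc
  have hA' : pvBigChar y x n.toNat rad matrix
      ((PySem.List.pyRange 0 n 1).foldl
        (fun m _ => (PySem.List.pyRange 0 rad 1).foldl (pvStepA y x rad) m) matrix) := by
    simpa using hA
  exact pvBigChar_unique hA' hB
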